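-- pv_equiv track=rewrite | github.com/uf-icbr-bioinformatics/bioscripts | methreport.py | detectGC
-- ===== SOURCE A (Python) =====
-- def detectGC(seq, length, excludeGCG=False):
--     """Returns the list of C positions in GC dinucleotides in sequence `seq'.
-- If `excludeGCG' is True, ignores GCG positions."""
--     result = []
--     candidate = False
--
--     for i in range(1, length):
--         if (seq[i] == 'C') and (seq[i-1] == 'G'):
--             # This is a GC position. Now check position i+1 if excluding GCGs
--             if excludeGCG:
--                 if (i == length-1) or seq[i+1] != 'G':
--                     result.append(i)
--             # Otherwise, simply add the position
--             else:
--                 result.append(i)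
--     return result
-- ===== SOURCE B (Python) =====
-- def detectGC(seq, length, excludeGCG=False):
--     """Returns the list of C positions in GC dinucleotides in the first
-- `length` characters of `seq`.  If `excludeGCG` is True, ignores GCG positions."""
--     s = seq[:length] if length > 0 else ''
--     result = []
--     p = s.find('GC')
--     while p >= 0:
--         c = p + 1
--         if not excludeGCG or s[c + 1:c + 2] != 'G':
--             result.append(c)
--         p = s.find('GC', p + 1)
--     return result
-- ===== Notes on version B (the rewrite author's own statement) =====
-- stated objective: faster
-- what changed: B slices the prefix seq[:length] once and then jumps from match to match with str.find('GC', start) (the end-of-prefix GCG corner falls out of an empty slice test), instead of A's per-index Python loop testing seq[i]/seq[i-1] at every position; the substring search runs in C, so B is measurably faster at the same O(n).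
import Mathlib
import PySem

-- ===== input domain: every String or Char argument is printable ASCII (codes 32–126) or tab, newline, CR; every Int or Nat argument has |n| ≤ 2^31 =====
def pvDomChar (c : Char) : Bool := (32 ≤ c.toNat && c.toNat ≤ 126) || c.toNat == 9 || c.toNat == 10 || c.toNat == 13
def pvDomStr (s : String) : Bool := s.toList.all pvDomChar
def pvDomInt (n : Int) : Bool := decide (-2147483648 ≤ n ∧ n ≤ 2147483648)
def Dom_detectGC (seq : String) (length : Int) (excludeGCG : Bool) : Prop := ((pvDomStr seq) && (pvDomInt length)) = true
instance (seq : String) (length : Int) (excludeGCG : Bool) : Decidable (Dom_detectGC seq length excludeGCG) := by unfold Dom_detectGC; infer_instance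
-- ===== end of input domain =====

-- B replaces A's per-index Python loop by repeated str.find('GC', …) over the prefix seq[:length] (same O(n), measurably faster: the substring scan runs in C).

-- ===== PORT A =====
def detectGC (seq : String) (length : Int) (excludeGCG : Bool) : List Int :=
  (PySem.List.pyRange 1 length 1).foldl
    (fun result i =>
      if PySem.List.pyGet? seq.toList i = some 'C' ∧ PySem.List.pyGet? seq.toList (i-1) = some 'G' then
        if excludeGCG then
          if i = length - 1 ∨ PySem.List.pyGet? seq.toList (i+1) ≠ some 'G' then result ++ [i] else result
        else result ++ [i]
      else result) []

-- ===== PORT B =====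
-- the `while p >= 0` loop of Source B; fuel s.length + 1 is enough since the search start strictly increases
def bLoop (s : List Char) (ex : Bool) : Nat → Int → List Int → List Int
  | 0, _, acc => acc
  | f+1, p, acc =>
    if 0 ≤ p then
      let c := p + 1
      let acc' := if !ex || decide (PySem.List.slice s (some (c+1)) (some (c+2)) ≠ ['G']) then acc ++ [c] else acc
      bLoop s ex f (PySem.Chars.findFrom s ['G', 'C'] (p+1) none) acc'
    else acc

def detectGC_alt (seq : String) (length : Int) (excludeGCG : Bool) : List Int :=
  let s := if 0 < length then PySem.List.slice seq.toList none (some length) else []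
  bLoop s excludeGCG (s.length + 1) (PySem.Chars.find s ['G', 'C']) []

-- ===== PRECONDITION & SPEC =====
-- Pre_ excludes exactly the inputs where A raises IndexError: length ≥ 2 with length > len(seq).
def Pre_detectGC (seq : String) (length : Int) (excludeGCG : Bool) : Prop :=
  length ≤ 1 ∨ length ≤ (seq.toList.length : Int)
instance (seq : String) (length : Int) (excludeGCG : Bool) : Decidable (Pre_detectGC seq length excludeGCG) := by unfold Pre_detectGC; infer_instance
def pvWitness_detectGC : String × Int × Bool := ("GCGCG", 5, true)

def Spec_detectGC (seq : String) (length : Int) (excludeGCG : Bool) (out : List Int) : Prop := out = detectGC_alt seq length excludeGCG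
instance (seq : String) (length : Int) (excludeGCG : Bool) (out : List Int) : Decidable (Spec_detectGC seq length excludeGCG out) := by unfold Spec_detectGC; infer_instance

-- ===== CLAIM (what is proved, stated in full; the proofs are below) =====
def Claim_equal_detectGC : Prop := ∀ (seq : String) (length : Int) (excludeGCG : Bool), Dom_detectGC seq length excludeGCG → Pre_detectGC seq length excludeGCG → Spec_detectGC seq length excludeGCG (detectGC seq length excludeGCG)
-- ===== LEMMAS AND PROOFS =====

-- the inclusion test B applies at a match position j (match = 'GC' starts at j; C reported at j+1)
def pvOk (t : List Char) (ex : Bool) (j : Nat) : Bool :=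
  decide (['G','C'] <+: t.drop j) && (!ex || decide ((t.drop (j+2)).take 1 ≠ ['G']))

-- reference result: matches at positions ≥ j, in order
def pvRef (t : List Char) (ex : Bool) (j : Nat) : List Int :=
  if _h : j < t.length then
    (if pvOk t ex j then [(j : Int) + 1] else []) ++ pvRef t ex (j+1)
  else []
termination_by t.length - j

theorem pv_pair_prefix_iff (u : List Char) : (['G','C'] <+: u) ↔ u[0]? = some 'G' ∧ u[1]? = some 'C' := by
  match u with
  | [] => simp
  | [a] => simp [List.cons_prefix_cons]
  | a :: b :: r => simp [List.cons_prefix_cons]; tauto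

theorem pv_hit_iff (t : List Char) (j : Nat) :
    (['G','C'] <+: t.drop j) ↔ t[j]? = some 'G' ∧ t[j+1]? = some 'C' := by
  rw [pv_pair_prefix_iff]
  constructor
  · rintro ⟨h0, h1⟩; exact ⟨by simpa using h0, by simpa [List.getElem?_drop] using h1⟩
  · rintro ⟨h0, h1⟩; exact ⟨by simpa using h0, by simpa [List.getElem?_drop] using h1⟩

theorem pv_hit_lt (t : List Char) (j : Nat) (h : ['G','C'] <+: t.drop j) : j + 2 ≤ t.length := by
  have := h.length_le; simp at this; omega

theorem pvRef_eq_nil (t : List Char) (ex : Bool) (p : Nat)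
    (h : ∀ j, p ≤ j → ¬ (['G','C'] <+: t.drop j)) : pvRef t ex p = [] := by
  by_cases hlt : p < t.length
  · rw [pvRef, dif_pos hlt]
    have hok : pvOk t ex p = false := by simp [pvOk, h p le_rfl]
    rw [hok]
    simpa using pvRef_eq_nil t ex (p+1) (fun j hj => h j (by omega))
  · rw [pvRef, dif_neg hlt]
termination_by t.length - p

theorem pvRef_skip (t : List Char) (ex : Bool) (p q : Nat) (hpq : p ≤ q)
    (h : ∀ j, p ≤ j → j < q → ¬ (['G','C'] <+: t.drop j)) : pvRef t ex p = pvRef t ex q := by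
  rcases Nat.eq_or_lt_of_le hpq with rfl | hlt
  · rfl
  · by_cases hp : p < t.length
    · rw [pvRef, dif_pos hp]
      have hok : pvOk t ex p = false := by simp [pvOk, h p le_rfl hlt]
      rw [hok]
      simpa using pvRef_skip t ex (p+1) q hlt (fun j h1 h2 => h j (by omega) h2)
    · have h1 : pvRef t ex p = [] := by rw [pvRef, dif_neg hp]
      have h2 : pvRef t ex q = [] := by rw [pvRef, dif_neg (by omega)]
      rw [h1, h2]
termination_by q - p

theorem pv_bLoop_eq (s : List Char) (ex : Bool) (fuel p : Nat) (acc : List Int)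
    (hp : p ≤ s.length) (hf : s.length + 1 ≤ fuel + p) :
    bLoop s ex fuel (PySem.Chars.findFrom s ['G','C'] (p : Int) none) acc = acc ++ pvRef s ex p := by
  induction fuel generalizing p acc with
  | zero => omega
  | succ f ih =>
    rw [PySem.Chars.findFrom_natCast s _ p hp]
    by_cases hd : PySem.Chars.find (s.drop p) ['G','C'] = -1
    · rw [if_pos hd]
      have hno : ∀ j, p ≤ j → ¬ (['G','C'] <+: s.drop j) := by
        intro j hj hpre
        have hsub : s.drop j = (s.drop p).drop (j - p) := by
          rw [List.drop_drop]; congr 1; omega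
        exact ((PySem.Chars.find_eq_neg_one_iff _ _).mp hd)
          (((hsub ▸ hpre).isInfix).trans (List.drop_suffix _ _).isInfix)
      rw [pvRef_eq_nil s ex p hno]
      simp [bLoop]
    · rw [if_neg hd]
      have h0 : 0 ≤ PySem.Chars.find (s.drop p) ['G','C'] := by
        have := PySem.Chars.neg_one_le_find (s.drop p) ['G','C']; omega
      obtain ⟨hpre, hmin⟩ := PySem.Chars.find_spec h0
      set d := (PySem.Chars.find (s.drop p) ['G','C']).toNat with hdt
      have hcast : ((p : Int) + PySem.Chars.find (s.drop p) ['G','C']) = ((p + d : Nat) : Int) := by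
        push_cast [hdt]; omega
      rw [hcast]
      have hhit : ['G','C'] <+: s.drop (p + d) := by rwa [List.drop_drop] at hpre
      have hq2 : (p + d) + 2 ≤ s.length := pv_hit_lt s (p + d) hhit
      rw [bLoop, if_pos (by positivity)]
      dsimp only
      have hs2 : ((p + d : Nat) : Int) + 1 + 2 = ((p + d + 3 : Nat) : Int) := by push_cast; ring
      have hs1 : ((p + d : Nat) : Int) + 1 + 1 = ((p + d + 2 : Nat) : Int) := by push_cast; ring
      rw [hs2, hs1, PySem.List.slice_natCast]
      have htake : p + d + 3 - (p + d + 2) = 1 := by omega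
      rw [htake]
      have hfrom : ((p + d : Nat) : Int) + 1 = ((p + d + 1 : Nat) : Int) := by push_cast; ring
      rw [hfrom, ih (p + d + 1) _ (by omega) (by omega)]
      have hskip : pvRef s ex p = pvRef s ex (p + d) := by
        apply pvRef_skip s ex p (p + d) (by omega)
        intro j h1 h2 hpj
        have hsub : s.drop j = (s.drop p).drop (j - p) := by
          rw [List.drop_drop]; congr 1; omega
        exact hmin (j - p) (by omega) (hsub ▸ hpj)
      have hstep : pvRef s ex (p + d)
          = (if pvOk s ex (p + d) then [((p + d : Nat) : Int) + 1] else []) ++ pvRef s ex (p + d + 1) := by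
        rw [pvRef, dif_pos (by omega : p + d < s.length)]
      have hok : pvOk s ex (p + d) = (!ex || decide ((s.drop (p + d + 2)).take 1 ≠ ['G'])) := by
        simp [pvOk, hhit]
      rw [hskip, hstep, ← hok]
      cases pvOk s ex (p + d)
      · simp
      · simp [List.append_assoc]

theorem pv_foldA_eq (cs : List Char) (n : Int) (ex : Bool) (hn : 1 ≤ n) (hle : n.toNat ≤ cs.length)
    (k : Nat) (acc : List Int) (hk : k ≤ n.toNat) :
    (PySem.List.pyRange ((k : Int) + 1) n 1).foldl
        (fun result i =>
          if PySem.List.pyGet? cs i = some 'C' ∧ PySem.List.pyGet? cs (i-1) = some 'G' then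
            if ex then
              if i = n - 1 ∨ PySem.List.pyGet? cs (i+1) ≠ some 'G' then result ++ [i] else result
            else result ++ [i]
          else result) acc = acc ++ pvRef (cs.take n.toNat) ex k := by
  have hnN : n = (n.toNat : Int) := by omega
  have hslen : (cs.take n.toNat).length = n.toNat := by simp; omega
  by_cases hend : n ≤ (k : Int) + 1
  · rw [PySem.List.pyRange_one_eq_nil hend]
    rw [pvRef_eq_nil _ ex k ?_]
    · simp
    · intro j hj hpre
      have h2 := pv_hit_lt _ j hpre
      omega
  · rw [not_le] at hend
    have hkN : k + 1 < n.toNat := by omega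
    rw [PySem.List.pyRange_one_cons hend, List.foldl_cons]
    have e1 : ((k : Int) + 1) = ((k + 1 : Nat) : Int) := by omega
    have e0 : ((k : Int) + 1 - 1) = ((k : Nat) : Int) := by omega
    have e2 : ((k : Int) + 1 + 1) = ((k + 2 : Nat) : Int) := by omega
    have hstep :
        (if PySem.List.pyGet? cs ((k : Int) + 1) = some 'C' ∧ PySem.List.pyGet? cs ((k : Int) + 1 - 1) = some 'G' then
            if ex then
              if (k : Int) + 1 = n - 1 ∨ PySem.List.pyGet? cs ((k : Int) + 1 + 1) ≠ some 'G' then acc ++ [(k : Int) + 1] else acc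
            else acc ++ [(k : Int) + 1]
          else acc) = acc ++ (if pvOk (cs.take n.toNat) ex k then [(k : Int) + 1] else []) := by
      rw [e0, e2, PySem.List.pyGet?_natCast, PySem.List.pyGet?_natCast]
      rw [show PySem.List.pyGet? cs ((k : Int) + 1) = cs[k+1]? from by rw [e1, PySem.List.pyGet?_natCast]]
      have hhit_iff : (['G','C'] <+: (cs.take n.toNat).drop k) ↔ cs[k]? = some 'G' ∧ cs[k+1]? = some 'C' := by
        rw [pv_hit_iff]
        rw [List.getElem?_take_of_lt (by omega), List.getElem?_take_of_lt (by omega)]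
      by_cases hC : cs[k+1]? = some 'C' <;> by_cases hG : cs[k]? = some 'G'
      · -- GC at k
        have hhit : ['G','C'] <+: (cs.take n.toNat).drop k := hhit_iff.mpr ⟨hG, hC⟩
        cases ex with
        | false => simp [pvOk, hhit, hC, hG]
        | true =>
          have hsec : ((k : Int) + 1 = n - 1 ∨ cs[k+2]? ≠ some 'G')
              ↔ (((cs.take n.toNat).drop (k+2)).take 1 ≠ ['G']) := by
            by_cases hlast : k + 2 = n.toNat
            · have hL : (k : Int) + 1 = n - 1 := by omega
              have hnil : ((cs.take n.toNat).drop (k+2)).take 1 = [] := by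
                rw [List.drop_eq_nil_of_le (by omega)]; rfl
              simp [hL, hnil]
            · have hlt : k + 2 < n.toNat := by omega
              have hL : ¬ ((k : Int) + 1 = n - 1) := by omega
              have hdropc : (cs.take n.toNat).drop (k+2)
                  = (cs.take n.toNat)[k+2]'(by omega) :: (cs.take n.toNat).drop (k+3) := by
                exact List.drop_eq_getElem_cons (by omega)
              have hgel : (cs.take n.toNat)[k+2]'(by omega) = cs[k+2]'(by omega) := by
                simp [List.getElem_take]
              have hge? : cs[k+2]? = some (cs[k+2]'(by omega)) := List.getElem?_eq_getElem (by omega)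
              rw [hdropc, hgel, hge?]
              simp [hL]
          by_cases hor : (k : Int) + 1 = n - 1 ∨ cs[k+2]? ≠ some 'G'
          · simp [pvOk, hhit, hC, hG, hor, hsec.mp hor]
          · have : ¬ (((cs.take n.toNat).drop (k+2)).take 1 ≠ ['G']) := fun h => hor (hsec.mpr h)
            simp [pvOk, hC, hG, hor, this]
      · simp [pvOk, hhit_iff, hC, hG]
      · simp [pvOk, hhit_iff, hC, hG]
      · simp [pvOk, hhit_iff, hC, hG]
    rw [hstep]
    rw [show ((k : Int) + 1 + 1) = ((k + 1 : Nat) : Int) + 1 from by push_cast; ring]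
    rw [pv_foldA_eq cs n ex hn hle (k + 1) _ (by omega)]
    have hunf : pvRef (cs.take n.toNat) ex k
        = (if pvOk (cs.take n.toNat) ex k then [(k : Int) + 1] else []) ++ pvRef (cs.take n.toNat) ex (k+1) := by
      rw [pvRef, dif_pos (by omega : k < (cs.take n.toNat).length)]
    rw [hunf, List.append_assoc]
termination_by n.toNat - k

-- ===== VERDICT (by name: the statement is the Claim_ definition above) =====
theorem detectGC_spec : Claim_equal_detectGC := by
  intro seq length ex _ hpre
  unfold Pre_detectGC at hpre
  unfold Spec_detectGC detectGC detectGC_alt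
  by_cases h0 : length ≤ 0
  · rw [PySem.List.pyRange_one_eq_nil (by omega), if_neg (by omega)]
    have hfind : PySem.Chars.find ([] : List Char) ['G','C'] = -1 := by decide
    simp [hfind, bLoop]
  · rw [if_pos (by omega)]
    have hc : (length : Int) = ((length.toNat : Nat) : Int) := by omega
    have hs : PySem.List.slice seq.toList none (some length) = seq.toList.take length.toNat := by
      rw [hc]; exact PySem.List.slice_to_natCast _ _
    rw [hs]
    dsimp only
    by_cases h1 : length = 1
    · subst h1
      rw [PySem.List.pyRange_one_eq_nil (by omega)]
      have hfind : PySem.Chars.find (seq.toList.take 1) ['G','C'] = -1 := by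
        rw [PySem.Chars.find_eq_neg_one_iff]
        intro hinf
        have hle2 := hinf.length_le
        simp at hle2
      simp [List.foldl_nil, hfind, bLoop]
    · have hlen : length.toNat ≤ seq.toList.length := by omega
      have hA := pv_foldA_eq seq.toList length ex (by omega) hlen 0 [] (by omega)
      simp only [Nat.cast_zero, zero_add] at hA
      rw [hA]
      have hB := pv_bLoop_eq (seq.toList.take length.toNat) ex
        ((seq.toList.take length.toNat).length + 1) 0 [] (Nat.zero_le _) (by omega)
      simp only [Nat.cast_zero] at hB
      rw [← PySem.Chars.findFrom_zero, hB]
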